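-- pv_equiv track=rewrite | github.com/andresdanfernandez/CodePathTIP102 | Unit11/inclass2.py | path_to_castle
-- ===== SOURCE A (Python) =====
-- def path_to_castle(town, kingdom):
--     if not kingdom:
--         return []
--
--     rows = len(kingdom)
--     cols = len(kingdom[0])
--
--
--     r, c = town
--     cr, cc = rows - 1, cols - 1
--
--     directions = [(1, 0), (0, 1), (-1, 0), (1, 0)]
--     visited = set()
--
--     # [1, 2] ->
--
--
--     def dfs(r, c):
--         stack = [(r, c)]
--         visited.add((r, c))
--
--         while stack:
--             row, col = stack.pop()
--             if (rows, cols) == (cr, cc):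
--                 return visited.add(rows, cols)
--             for dr, dc in directions:
--                 nr, nc = row + dr, col + dc
--                 if 0 <= nr < rows and 0 <= nc < cols:
--                     if kingdom[nr][nc] == 'X' and (nr, nc) not in visited:
--                         visited.add((nr, nc))
--                         stack.append((nr, nc))
--
--
--     dfs(r, c)
--     return list(sorted(visited))
-- ===== SOURCE B (Python) =====
-- def path_to_castle(town, kingdom):
--     # Chaotic-iteration saturation: repeatedly sweep the whole grid row-major,
--     # claiming any 'X' cell whose predecessor (the cell above, to the left, or
--     # below -- the reverses of the moves down, right, up) is already claimed,
--     # until a full sweep changes nothing.  No stack, no neighbour-offset list.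
--     if not kingdom:
--         return []
--     rows = len(kingdom)
--     cols = len(kingdom[0])
--     visited = {(town[0], town[1])}
--     changed = True
--     while changed:
--         changed = False
--         for r in range(rows):
--             for c in range(cols):
--                 if kingdom[r][c] == 'X' and (r, c) not in visited and \
--                         ((r - 1, c) in visited or (r, c - 1) in visited or (r + 1, c) in visited):
--                     visited.add((r, c))
--                     changed = True
--     return sorted(visited)
-- ===== Notes on version B (the rewrite author's own statement) =====
-- stated objective: alternative
-- what changed: Replaces the explicit-stack worklist DFS (pop a cell, push its unvisited down/right/up 'X' neighbours) by chaotic-iteration saturation: repeatedly sweep the whole grid row-major, claiming any 'X' cell whose up/left/down predecessor is already claimed, until a sweep changes nothing; no stack, no direction-offset list, and no dead always-false early-return branch.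
-- outside the precondition, e.g. on path_to_castle((2, 2), [['X', 'X'], ['X']]): A returns [(2, 2)], B raises IndexError
import Mathlib
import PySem

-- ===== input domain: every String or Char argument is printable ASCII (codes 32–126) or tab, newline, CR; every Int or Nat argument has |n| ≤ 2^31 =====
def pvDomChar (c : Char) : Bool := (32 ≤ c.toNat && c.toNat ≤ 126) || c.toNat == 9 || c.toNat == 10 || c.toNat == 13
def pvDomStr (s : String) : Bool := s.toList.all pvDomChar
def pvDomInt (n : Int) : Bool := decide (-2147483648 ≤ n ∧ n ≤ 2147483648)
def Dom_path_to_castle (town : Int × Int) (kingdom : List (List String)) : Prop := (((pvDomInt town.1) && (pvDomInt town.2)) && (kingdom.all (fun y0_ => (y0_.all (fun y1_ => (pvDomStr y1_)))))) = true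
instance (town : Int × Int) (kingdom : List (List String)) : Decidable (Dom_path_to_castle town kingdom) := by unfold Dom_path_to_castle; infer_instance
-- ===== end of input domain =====

-- B replaces A's explicit-stack worklist DFS by chaotic-iteration saturation (row-major sweeps
-- claiming any 'X' cell whose up/left/down predecessor is already claimed, until a sweep
-- changes nothing); objective: alternative.

-- ===== PORT A =====
-- kingdom[nr][nc]; under Pre_ every access performed by either program is in range,
-- so the defaults are never read.
def pvCell (kingdom : List (List String)) (nr nc : Int) : String :=
  PySem.List.pyGetD (PySem.List.pyGetD kingdom nr []) nc ""

def pvDirsA : List (Int × Int) := [(1, 0), (0, 1), (-1, 0), (1, 0)]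

-- body of A's `for dr, dc in directions` loop; the stack is kept top-at-head
-- (Python appends and pops at the same end), so append = cons and pop = uncons.
def pvStepA (rows cols : Int) (kingdom : List (List String)) (row col : Int)
    (st : List (Int × Int) × PySem.Set (Int × Int)) (d : Int × Int) :
    List (Int × Int) × PySem.Set (Int × Int) :=
  let nr := row + d.1
  let nc := col + d.2
  if 0 ≤ nr ∧ nr < rows ∧ 0 ≤ nc ∧ nc < cols then
    if pvCell kingdom nr nc = "X" ∧ (nr, nc) ∉ st.2 then
      ((nr, nc) :: st.1, PySem.Set.add st.2 (nr, nc))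
    else st
  else st

-- A's `while stack` loop. The Nat argument is fuel only (the caller passes more fuel than
-- the loop can iterate, see pvDfsA_spec); the fuel-0 branch is never reached.
def pvDfsA (rows cols : Int) (kingdom : List (List String)) :
    Nat → List (Int × Int) → PySem.Set (Int × Int) → PySem.Set (Int × Int)
  | 0, _, visited => visited
  | _ + 1, [], visited => visited
  | fuel + 1, (row, col) :: rest, visited =>
      -- Python: `if (rows, cols) == (cr, cc): return visited.add(rows, cols)` with
      -- cr = rows - 1, cc = cols - 1 — the test is never true, the branch is dead.
      if rows = rows - 1 ∧ cols = cols - 1 then visited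
      else
        let st := pvDirsA.foldl (pvStepA rows cols kingdom row col) (rest, visited)
        pvDfsA rows cols kingdom fuel st.1 st.2

def path_to_castle (town : Int × Int) (kingdom : List (List String)) : List (Int × Int) :=
  if kingdom = [] then []
  else
    let rows : Int := kingdom.length
    let cols : Int := (PySem.List.pyGetD kingdom 0 ([] : List String)).length
    let visited := pvDfsA rows cols kingdom (2 * (rows.toNat * cols.toNat) + 2)
      [(town.1, town.2)] (PySem.Set.add PySem.Set.empty (town.1, town.2))
    PySem.List.sorted2 visited Prod.fst Prod.snd

-- ===== PORT B =====
-- body of B's innermost `if`: claim cell (r, c) when it is 'X', fresh, and one of the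
-- cells above, to the left of, or below it is already claimed; flag = `changed`.
def pvSweepCell (kingdom : List (List String))
    (st : PySem.Set (Int × Int) × Bool) (r c : Int) : PySem.Set (Int × Int) × Bool :=
  if pvCell kingdom r c = "X" ∧ (r, c) ∉ st.1 ∧
      ((r - 1, c) ∈ st.1 ∨ (r, c - 1) ∈ st.1 ∨ (r + 1, c) ∈ st.1) then
    (PySem.Set.add st.1 (r, c), true)
  else st

-- B's inner `for c in range(cols)` loop, one grid row
def pvSweepRow (kingdom : List (List String)) (cols : Int)
    (st : PySem.Set (Int × Int) × Bool) (r : Int) : PySem.Set (Int × Int) × Bool :=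
  (PySem.List.pyRange 0 cols 1).foldl (fun st c => pvSweepCell kingdom st r c) st

-- one full sweep of the grid (`changed = False; for r in range(rows): …`)
def pvSweep (rows cols : Int) (kingdom : List (List String))
    (visited : PySem.Set (Int × Int)) : PySem.Set (Int × Int) × Bool :=
  (PySem.List.pyRange 0 rows 1).foldl (pvSweepRow kingdom cols) (visited, false)

-- B's `while changed` loop. The Nat argument is fuel only (the caller passes more fuel
-- than the loop can iterate, see pvSatB_spec); the fuel-0 branch is never reached.
def pvSatB (rows cols : Int) (kingdom : List (List String)) :
    Nat → PySem.Set (Int × Int) → PySem.Set (Int × Int)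
  | 0, visited => visited
  | k + 1, visited =>
      let st := pvSweep rows cols kingdom visited
      if st.2 then pvSatB rows cols kingdom k st.1 else st.1

def path_to_castle_alt (town : Int × Int) (kingdom : List (List String)) : List (Int × Int) :=
  if kingdom = [] then []
  else
    let rows : Int := kingdom.length
    let cols : Int := (PySem.List.pyGetD kingdom 0 ([] : List String)).length
    let visited := pvSatB rows cols kingdom (rows.toNat * cols.toNat + 2)
      (PySem.Set.ofList [(town.1, town.2)])
    PySem.List.sorted2 visited Prod.fst Prod.snd

-- ===== PRECONDITION & SPEC =====
-- Pre_ excludes jagged kingdoms (a row shorter than row 0): on those Python A can raise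
-- IndexError; it also drops jagged inputs whose short rows are never reached, on which A
-- returns normally (see the claim's cites) — B's full-grid sweep reads every cell and
-- raises there.
def Pre_path_to_castle (town : Int × Int) (kingdom : List (List String)) : Prop :=
  ∀ row ∈ kingdom, (kingdom.headD []).length ≤ row.length
instance (town : Int × Int) (kingdom : List (List String)) : Decidable (Pre_path_to_castle town kingdom) := by unfold Pre_path_to_castle; infer_instance

def pvWitness_path_to_castle : (Int × Int) × List (List String) := ((0, 0), [["X", "."], [".", "X"]])

def Spec_path_to_castle (town : Int × Int) (kingdom : List (List String)) (out : List (Int × Int)) : Prop := out = path_to_castle_alt town kingdom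
instance (town : Int × Int) (kingdom : List (List String)) (out : List (Int × Int)) : Decidable (Spec_path_to_castle town kingdom out) := by unfold Spec_path_to_castle; infer_instance

-- ===== CLAIM (what is proved, stated in full; the proofs are below) =====
def Claim_equal_path_to_castle : Prop := ∀ (town : Int × Int) (kingdom : List (List String)), Dom_path_to_castle town kingdom → Pre_path_to_castle town kingdom → Spec_path_to_castle town kingdom (path_to_castle town kingdom)

-- ===== LEMMAS AND PROOFS =====

-- the cell (w) is in bounds and holds 'X'
def pvOk (rows cols : Int) (kingdom : List (List String)) (w : Int × Int) : Prop :=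
  0 ≤ w.1 ∧ w.1 < rows ∧ 0 ≤ w.2 ∧ w.2 < cols ∧ pvCell kingdom w.1 w.2 = "X"

def pvDirsB : List (Int × Int) := [(1, 0), (0, 1), (-1, 0)]

-- one directed move (down, right or up) into an in-bounds 'X' cell
def pvAdj (rows cols : Int) (kingdom : List (List String)) (u w : Int × Int) : Prop :=
  (∃ d ∈ pvDirsB, w = (u.1 + d.1, u.2 + d.2)) ∧ pvOk rows cols kingdom w

inductive pvReach (rows cols : Int) (kingdom : List (List String)) (start : Int × Int) :
    Int × Int → Prop
  | base : pvReach rows cols kingdom start start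
  | step {u w : Int × Int} : pvReach rows cols kingdom start u →
      pvAdj rows cols kingdom u w → pvReach rows cols kingdom start w

lemma pv_mem_dirsA_iff (d : Int × Int) : d ∈ pvDirsA ↔ d ∈ pvDirsB := by
  simp [pvDirsA, pvDirsB]; tauto

-- distinct cells that are the start or in bounds number at most rows*cols + 1
lemma pv_len_le (rows cols : Int) (start : Int × Int) (l : List (Int × Int))
    (hnd : l.Nodup)
    (hs : ∀ x ∈ l, x = start ∨ (0 ≤ x.1 ∧ x.1 < rows ∧ 0 ≤ x.2 ∧ x.2 < cols)) :
    l.length ≤ rows.toNat * cols.toNat + 1 := by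
  classical
  have hsub : l.toFinset ⊆ insert start ((Finset.Ico (0 : Int) rows) ×ˢ (Finset.Ico (0 : Int) cols)) := by
    intro x hx
    rcases hs x (List.mem_toFinset.mp hx) with h | h
    · simp [h]
    · simp only [Finset.mem_insert, Finset.mem_product, Finset.mem_Ico]
      exact Or.inr ⟨⟨h.1, h.2.1⟩, ⟨h.2.2.1, h.2.2.2⟩⟩
  calc l.length = l.toFinset.card := (List.toFinset_card_of_nodup hnd).symm
    _ ≤ (insert start ((Finset.Ico (0 : Int) rows) ×ˢ (Finset.Ico (0 : Int) cols))).card :=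
        Finset.card_le_card hsub
    _ ≤ ((Finset.Ico (0 : Int) rows) ×ˢ (Finset.Ico (0 : Int) cols)).card + 1 :=
        Finset.card_insert_le _ _
    _ = rows.toNat * cols.toNat + 1 := by
        rw [Finset.card_product, Int.card_Ico, Int.card_Ico]; simp

-- effect of A's direction loop on (stack, visited)
lemma pvStepA_foldl (rows cols : Int) (kingdom : List (List String)) (row col : Int) :
    ∀ (ds : List (Int × Int)) (s : List (Int × Int) × PySem.Set (Int × Int)),
    s.2.Nodup →
    (∀ x ∈ s.2, x ∈ (ds.foldl (pvStepA rows cols kingdom row col) s).2) ∧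
    (∀ x ∈ (ds.foldl (pvStepA rows cols kingdom row col) s).2,
        x ∈ s.2 ∨ ((∃ d ∈ ds, x = (row + d.1, col + d.2)) ∧ pvOk rows cols kingdom x)) ∧
    (∀ x ∈ (ds.foldl (pvStepA rows cols kingdom row col) s).1,
        x ∈ s.1 ∨ x ∈ (ds.foldl (pvStepA rows cols kingdom row col) s).2) ∧
    (∀ d ∈ ds, pvOk rows cols kingdom (row + d.1, col + d.2) →
        (row + d.1, col + d.2) ∈ (ds.foldl (pvStepA rows cols kingdom row col) s).2) ∧
    (ds.foldl (pvStepA rows cols kingdom row col) s).2.Nodup ∧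
    ((ds.foldl (pvStepA rows cols kingdom row col) s).2.length + s.1.length
      = s.2.length + (ds.foldl (pvStepA rows cols kingdom row col) s).1.length) ∧
    s.2.length ≤ (ds.foldl (pvStepA rows cols kingdom row col) s).2.length ∧
    (∀ x ∈ (ds.foldl (pvStepA rows cols kingdom row col) s).2,
        x ∉ (ds.foldl (pvStepA rows cols kingdom row col) s).1 → x ∈ s.2 ∧ x ∉ s.1) := by
  intro ds
  induction ds with
  | nil =>
    intro s hnd
    refine ⟨fun x hx => hx, fun x hx => Or.inl hx, fun x hx => Or.inl hx,
      fun d hd => absurd hd (List.not_mem_nil), hnd, rfl, le_rfl, fun x hx hnx => ⟨hx, hnx⟩⟩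
  | cons d ds ih =>
    intro s hnd
    simp only [List.foldl_cons]
    have hcase :
        (¬ pvOk rows cols kingdom (row + d.1, col + d.2) ∧
          pvStepA rows cols kingdom row col s d = s) ∨
        (pvOk rows cols kingdom (row + d.1, col + d.2) ∧ (row + d.1, col + d.2) ∈ s.2 ∧
          pvStepA rows cols kingdom row col s d = s) ∨
        (pvOk rows cols kingdom (row + d.1, col + d.2) ∧ (row + d.1, col + d.2) ∉ s.2 ∧
          pvStepA rows cols kingdom row col s d
            = ((row + d.1, col + d.2) :: s.1, s.2 ++ [(row + d.1, col + d.2)])) := by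
      by_cases h1 : 0 ≤ row + d.1 ∧ row + d.1 < rows ∧ 0 ≤ col + d.2 ∧ col + d.2 < cols
      · by_cases hX : pvCell kingdom (row + d.1) (col + d.2) = "X"
        · by_cases hm : (row + d.1, col + d.2) ∈ s.2
          · refine Or.inr (Or.inl ⟨⟨h1.1, h1.2.1, h1.2.2.1, h1.2.2.2, hX⟩, hm, ?_⟩)
            simp only [pvStepA]
            rw [if_pos h1, if_neg (by tauto)]
          · refine Or.inr (Or.inr ⟨⟨h1.1, h1.2.1, h1.2.2.1, h1.2.2.2, hX⟩, hm, ?_⟩)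
            simp only [pvStepA]
            rw [if_pos h1, if_pos ⟨hX, hm⟩, ← PySem.Set.add_of_not_mem hm]
        · refine Or.inl ⟨fun hok => hX hok.2.2.2.2, ?_⟩
          simp only [pvStepA]
          rw [if_pos h1, if_neg (by tauto)]
      · refine Or.inl ⟨fun hok => h1 ⟨hok.1, hok.2.1, hok.2.2.1, hok.2.2.2.1⟩, ?_⟩
        simp only [pvStepA]
        rw [if_neg h1]
    rcases hcase with ⟨hok, heq⟩ | ⟨hok, hm, heq⟩ | ⟨hok, hm, heq⟩
    · rw [heq]
      obtain ⟨i1, i2, i3, i4, i5, i6, i7, i8⟩ := ih s hnd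
      refine ⟨i1, fun x hx => ?_, i3, fun d' hd' hokd' => ?_, i5, i6, i7, i8⟩
      · rcases i2 x hx with h | ⟨⟨d', hd', hxe⟩, hxo⟩
        · exact Or.inl h
        · exact Or.inr ⟨⟨d', List.mem_cons_of_mem _ hd', hxe⟩, hxo⟩
      · rcases List.mem_cons.mp hd' with rfl | hd''
        · exact absurd hokd' hok
        · exact i4 d' hd'' hokd'
    · rw [heq]
      obtain ⟨i1, i2, i3, i4, i5, i6, i7, i8⟩ := ih s hnd
      refine ⟨i1, fun x hx => ?_, i3, fun d' hd' hokd' => ?_, i5, i6, i7, i8⟩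
      · rcases i2 x hx with h | ⟨⟨d', hd', hxe⟩, hxo⟩
        · exact Or.inl h
        · exact Or.inr ⟨⟨d', List.mem_cons_of_mem _ hd', hxe⟩, hxo⟩
      · rcases List.mem_cons.mp hd' with rfl | hd''
        · exact i1 _ hm
        · exact i4 d' hd'' hokd'
    · rw [heq]
      have hnd1 : (s.2 ++ [(row + d.1, col + d.2)]).Nodup := by
        rw [← PySem.Set.add_of_not_mem hm]
        exact PySem.Set.nodup_add _ _ hnd
      obtain ⟨i1, i2, i3, i4, i5, i6, i7, i8⟩ :=
        ih ((row + d.1, col + d.2) :: s.1, s.2 ++ [(row + d.1, col + d.2)]) hnd1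
      refine ⟨fun x hx => i1 x (by simp [hx]), fun x hx => ?_, fun x hx => ?_,
        fun d' hd' hokd' => ?_, i5, by simp at i6 ⊢; omega, ?_, fun x hx hnx => ?_⟩
      · rcases i2 x hx with h | ⟨⟨d', hd', hxe⟩, hxo⟩
        · rcases List.mem_append.mp h with h' | h'
          · exact Or.inl h'
          · refine Or.inr ⟨⟨d, List.mem_cons_self, by simpa using h'⟩, ?_⟩
            rw [show x = (row + d.1, col + d.2) by simpa using h']
            exact hok
        · exact Or.inr ⟨⟨d', List.mem_cons_of_mem _ hd', hxe⟩, hxo⟩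
      · rcases i3 x hx with h | h
        · rcases List.mem_cons.mp h with rfl | h'
          · exact Or.inr (i1 _ (by simp))
          · exact Or.inl h'
        · exact Or.inr h
      · rcases List.mem_cons.mp hd' with rfl | hd''
        · exact i1 _ (by simp)
        · exact i4 d' hd'' hokd'
      · calc s.2.length ≤ (s.2 ++ [(row + d.1, col + d.2)]).length := by simp
          _ ≤ _ := i7
      · obtain ⟨hx2, hnx2⟩ := i8 x hx hnx
        rcases List.mem_append.mp hx2 with h' | h'
        · refine ⟨h', fun hxs => hnx2 (List.mem_cons_of_mem _ hxs)⟩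
        · exact absurd (List.mem_cons_self (a := (row + d.1, col + d.2)) (l := s.1))
            (by rw [show x = (row + d.1, col + d.2) by simpa using h'] at hnx2; exact hnx2)

-- A's worklist loop computes exactly the reachable set
lemma pvDfsA_spec (rows cols : Int) (kingdom : List (List String)) (start : Int × Int) :
    ∀ (fuel : Nat) (stack : List (Int × Int)) (v : PySem.Set (Int × Int)),
    v.Nodup →
    (∀ x ∈ stack, x ∈ v) →
    (∀ x ∈ v, x = start ∨ (0 ≤ x.1 ∧ x.1 < rows ∧ 0 ≤ x.2 ∧ x.2 < cols)) →
    (∀ x ∈ v, pvReach rows cols kingdom start x) →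
    (∀ x ∈ v, x ∉ stack → ∀ w, pvAdj rows cols kingdom x w → w ∈ v) →
    stack.length + 2 * (rows.toNat * cols.toNat + 1 - v.length) ≤ fuel →
    (∀ x ∈ v, x ∈ pvDfsA rows cols kingdom fuel stack v) ∧
    (∀ x ∈ pvDfsA rows cols kingdom fuel stack v, pvReach rows cols kingdom start x) ∧
    (∀ x ∈ pvDfsA rows cols kingdom fuel stack v, ∀ w, pvAdj rows cols kingdom x w →
        w ∈ pvDfsA rows cols kingdom fuel stack v) ∧
    (pvDfsA rows cols kingdom fuel stack v).Nodup := by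
  intro fuel
  induction fuel with
  | zero =>
    intro stack v hnd hstk hgrid hreach hexp hfuel
    have hstack : stack = [] := List.length_eq_zero_iff.mp (by omega)
    subst hstack
    simp only [pvDfsA]
    exact ⟨fun x hx => hx, hreach,
      fun x hx w hadj => hexp x hx (List.not_mem_nil) w hadj, hnd⟩
  | succ fuel IH =>
    intro stack v hnd hstk hgrid hreach hexp hfuel
    match stack with
    | [] =>
      simp only [pvDfsA]
      exact ⟨fun x hx => hx, hreach,
        fun x hx w hadj => hexp x hx (List.not_mem_nil) w hadj, hnd⟩
    | (row, col) :: rest =>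
      have hdead : ¬ (rows = rows - 1 ∧ cols = cols - 1) := by omega
      have heq : pvDfsA rows cols kingdom (fuel + 1) ((row, col) :: rest) v
          = pvDfsA rows cols kingdom fuel
              (pvDirsA.foldl (pvStepA rows cols kingdom row col) (rest, v)).1
              (pvDirsA.foldl (pvStepA rows cols kingdom row col) (rest, v)).2 := by
        simp only [pvDfsA]
        rw [if_neg hdead]
      obtain ⟨f1, f2, f3, f4, f5, f6, f7, f8⟩ :=
        pvStepA_foldl rows cols kingdom row col pvDirsA (rest, v) hnd
      set s' := pvDirsA.foldl (pvStepA rows cols kingdom row col) (rest, v) with hs'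
      have hpop : (row, col) ∈ v := hstk _ List.mem_cons_self
      have hgrid' : ∀ x ∈ s'.2, x = start ∨ (0 ≤ x.1 ∧ x.1 < rows ∧ 0 ≤ x.2 ∧ x.2 < cols) := by
        intro x hx
        rcases f2 x hx with h | ⟨_, hok⟩
        · exact hgrid x h
        · exact Or.inr ⟨hok.1, hok.2.1, hok.2.2.1, hok.2.2.2.1⟩
      have hstk' : ∀ x ∈ s'.1, x ∈ s'.2 := by
        intro x hx
        rcases f3 x hx with h | h
        · exact f1 x (hstk x (List.mem_cons_of_mem _ h))
        · exact h
      have hreach' : ∀ x ∈ s'.2, pvReach rows cols kingdom start x := by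
        intro x hx
        rcases f2 x hx with h | ⟨⟨d, hd, hxe⟩, hok⟩
        · exact hreach x h
        · exact pvReach.step (hreach _ hpop)
            ⟨⟨d, (pv_mem_dirsA_iff d).mp hd, hxe⟩, hok⟩
      have hexp' : ∀ x ∈ s'.2, x ∉ s'.1 → ∀ w, pvAdj rows cols kingdom x w → w ∈ s'.2 := by
        intro x hx hnx w hadj
        obtain ⟨hxv, hxr⟩ := f8 x hx hnx
        by_cases hxe : x = (row, col)
        · subst hxe
          obtain ⟨⟨d, hd, hwe⟩, hok⟩ := hadj
          rw [hwe]
          exact f4 d ((pv_mem_dirsA_iff d).mpr hd) (by rw [← hwe]; exact hok)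
        · refine f1 w (hexp x hxv ?_ w hadj)
          simp [hxe, hxr]
      have hvle : v.length ≤ rows.toNat * cols.toNat + 1 :=
        pv_len_le rows cols start v hnd hgrid
      have hvle' : s'.2.length ≤ rows.toNat * cols.toNat + 1 :=
        pv_len_le rows cols start s'.2 f5 hgrid'
      have hfuel' : s'.1.length + 2 * (rows.toNat * cols.toNat + 1 - s'.2.length) ≤ fuel := by
        have e1 : s'.2.length + rest.length = v.length + s'.1.length := by simpa using f6
        have e2 : v.length ≤ s'.2.length := by simpa using f7
        have e3 : rest.length + 1 + 2 * (rows.toNat * cols.toNat + 1 - v.length) ≤ fuel + 1 := by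
          simpa using hfuel
        omega
      obtain ⟨g1, g2, g3, g4⟩ := IH s'.1 s'.2 f5 hstk' hgrid' hreach' hexp' hfuel'
      rw [heq]
      exact ⟨fun x hx => g1 x (f1 x hx), g2, g3, g4⟩

-- the invariants carried through B's sweeps
def pvGood (rows cols : Int) (kingdom : List (List String)) (start : Int × Int)
    (v : PySem.Set (Int × Int)) : Prop :=
  v.Nodup ∧ (∀ x ∈ v, x = start ∨ (0 ≤ x.1 ∧ x.1 < rows ∧ 0 ≤ x.2 ∧ x.2 < cols)) ∧
    (∀ x ∈ v, pvReach rows cols kingdom start x)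

-- effect of one row of B's sweep
lemma pvSweepRow_foldl (rows cols : Int) (kingdom : List (List String)) (start : Int × Int)
    (r : Int) (hr : 0 ≤ r ∧ r < rows) :
    ∀ (cs : List Int) (st : PySem.Set (Int × Int) × Bool),
    (∀ c ∈ cs, 0 ≤ c ∧ c < cols) →
    pvGood rows cols kingdom start st.1 →
    pvGood rows cols kingdom start
        (cs.foldl (fun st c => pvSweepCell kingdom st r c) st).1 ∧
    (∀ x ∈ st.1, x ∈ (cs.foldl (fun st c => pvSweepCell kingdom st r c) st).1) ∧
    (st.2 = true → (cs.foldl (fun st c => pvSweepCell kingdom st r c) st).2 = true) ∧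
    ((cs.foldl (fun st c => pvSweepCell kingdom st r c) st).2 = false →
        (cs.foldl (fun st c => pvSweepCell kingdom st r c) st) = st) ∧
    st.1.length ≤ (cs.foldl (fun st c => pvSweepCell kingdom st r c) st).1.length ∧
    (st.2 = false → (cs.foldl (fun st c => pvSweepCell kingdom st r c) st).2 = true →
        st.1.length < (cs.foldl (fun st c => pvSweepCell kingdom st r c) st).1.length) ∧
    (∀ c ∈ cs, pvCell kingdom r c = "X" →
        ((r - 1, c) ∈ st.1 ∨ (r, c - 1) ∈ st.1 ∨ (r + 1, c) ∈ st.1) →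
        (r, c) ∈ (cs.foldl (fun st c => pvSweepCell kingdom st r c) st).1) := by
  intro cs
  induction cs with
  | nil =>
    intro st _ hg
    simp only [List.foldl_nil]
    exact ⟨hg, fun x hx => hx, fun h => h, fun _ => trivial, le_rfl,
      fun h1 h2 => by rw [h1] at h2; exact absurd h2 (by simp),
      fun c hc => absurd hc (List.not_mem_nil)⟩
  | cons c cs ih =>
    intro st hcs hg
    simp only [List.foldl_cons]
    have hc : 0 ≤ c ∧ c < cols := hcs c List.mem_cons_self
    by_cases hcond : pvCell kingdom r c = "X" ∧ (r, c) ∉ st.1 ∧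
        ((r - 1, c) ∈ st.1 ∨ (r, c - 1) ∈ st.1 ∨ (r + 1, c) ∈ st.1)
    · have hstep : pvSweepCell kingdom st r c = (PySem.Set.add st.1 (r, c), true) := by
        simp only [pvSweepCell]; rw [if_pos hcond]
      have hadd : PySem.Set.add st.1 (r, c) = st.1 ++ [(r, c)] :=
        PySem.Set.add_of_not_mem hcond.2.1
      have hokrc : pvOk rows cols kingdom (r, c) := ⟨hr.1, hr.2, hc.1, hc.2, hcond.1⟩
      have hadjrc : ∃ u ∈ st.1, pvAdj rows cols kingdom u (r, c) := by
        rcases hcond.2.2 with hp | hp | hp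
        · exact ⟨(r - 1, c), hp, ⟨(1, 0), by simp [pvDirsB], by simp⟩, hokrc⟩
        · exact ⟨(r, c - 1), hp, ⟨(0, 1), by simp [pvDirsB], by simp⟩, hokrc⟩
        · exact ⟨(r + 1, c), hp, ⟨(-1, 0), by simp [pvDirsB], by simp⟩, hokrc⟩
      have hg' : pvGood rows cols kingdom start (PySem.Set.add st.1 (r, c)) := by
        obtain ⟨hnd, hb, hrch⟩ := hg
        refine ⟨PySem.Set.nodup_add _ _ hnd, ?_, ?_⟩
        · intro x hx
          rw [hadd] at hx
          rcases List.mem_append.mp hx with h | h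
          · exact hb x h
          · rw [show x = (r, c) by simpa using h]
            exact Or.inr ⟨hr.1, hr.2, hc.1, hc.2⟩
        · intro x hx
          rw [hadd] at hx
          rcases List.mem_append.mp hx with h | h
          · exact hrch x h
          · rw [show x = (r, c) by simpa using h]
            obtain ⟨u, hu, hadj⟩ := hadjrc
            exact pvReach.step (hrch u hu) hadj
      obtain ⟨j1, j2, j3, j4, j5, j6, j7⟩ := ih (PySem.Set.add st.1 (r, c), true) (fun c' hc' => hcs c' (List.mem_cons_of_mem _ hc')) hg'
      rw [hstep]
      refine ⟨j1, fun x hx => j2 x (by rw [hadd]; exact List.mem_append_left _ hx),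
        fun _ => j3 rfl, fun hf => absurd (j3 rfl) (by rw [hf]; simp),
        ?_, fun _ _ => ?_, fun c' hc' hX hp => ?_⟩
      · calc st.1.length ≤ (PySem.Set.add st.1 (r, c)).length := by rw [hadd]; simp
          _ ≤ _ := j5
      · calc st.1.length < (PySem.Set.add st.1 (r, c)).length := by rw [hadd]; simp
          _ ≤ _ := j5
      · rcases List.mem_cons.mp hc' with rfl | hc''
        · exact j2 _ (by rw [hadd]; simp)
        · refine j7 c' hc'' hX ?_
          have hmono : ∀ y, y ∈ st.1 → y ∈ PySem.Set.add st.1 (r, c) := by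
            intro y hy; rw [hadd]; exact List.mem_append_left _ hy
          rcases hp with hp | hp | hp
          · exact Or.inl (hmono _ hp)
          · exact Or.inr (Or.inl (hmono _ hp))
          · exact Or.inr (Or.inr (hmono _ hp))
    · have hstep : pvSweepCell kingdom st r c = st := by
        simp only [pvSweepCell]; rw [if_neg hcond]
      obtain ⟨j1, j2, j3, j4, j5, j6, j7⟩ := ih st (fun c' hc' => hcs c' (List.mem_cons_of_mem _ hc')) hg
      rw [hstep]
      refine ⟨j1, j2, j3, j4, j5, j6, fun c' hc' hX hp => ?_⟩
      rcases List.mem_cons.mp hc' with rfl | hc''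
      · have hin : (r, c') ∈ st.1 := by
          by_contra hno
          exact hcond ⟨hX, hno, hp⟩
        exact j2 _ hin
      · exact j7 c' hc'' hX hp

-- effect of B's whole sweep
lemma pvSweep_foldl (rows cols : Int) (kingdom : List (List String)) (start : Int × Int) :
    ∀ (rs : List Int) (st : PySem.Set (Int × Int) × Bool),
    (∀ r ∈ rs, 0 ≤ r ∧ r < rows) →
    pvGood rows cols kingdom start st.1 →
    pvGood rows cols kingdom start (rs.foldl (pvSweepRow kingdom cols) st).1 ∧
    (∀ x ∈ st.1, x ∈ (rs.foldl (pvSweepRow kingdom cols) st).1) ∧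
    (st.2 = true → (rs.foldl (pvSweepRow kingdom cols) st).2 = true) ∧
    ((rs.foldl (pvSweepRow kingdom cols) st).2 = false →
        (rs.foldl (pvSweepRow kingdom cols) st) = st) ∧
    st.1.length ≤ (rs.foldl (pvSweepRow kingdom cols) st).1.length ∧
    (st.2 = false → (rs.foldl (pvSweepRow kingdom cols) st).2 = true →
        st.1.length < (rs.foldl (pvSweepRow kingdom cols) st).1.length) ∧
    (∀ r ∈ rs, ∀ c, 0 ≤ c → c < cols → pvCell kingdom r c = "X" →
        ((r - 1, c) ∈ st.1 ∨ (r, c - 1) ∈ st.1 ∨ (r + 1, c) ∈ st.1) →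
        (r, c) ∈ (rs.foldl (pvSweepRow kingdom cols) st).1) := by
  intro rs
  induction rs with
  | nil =>
    intro st _ hg
    simp only [List.foldl_nil]
    exact ⟨hg, fun x hx => hx, fun h => h, fun _ => trivial, le_rfl,
      fun h1 h2 => by rw [h1] at h2; exact absurd h2 (by simp),
      fun r hr => absurd hr (List.not_mem_nil)⟩
  | cons r rs ih =>
    intro st hrs hg
    simp only [List.foldl_cons]
    have hr : 0 ≤ r ∧ r < rows := hrs r List.mem_cons_self
    have hcs : ∀ c ∈ PySem.List.pyRange 0 cols 1, 0 ≤ c ∧ c < cols := by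
      intro c hc
      exact (PySem.List.mem_pyRange_one).mp hc
    obtain ⟨k1, k2, k3, k4, k5, k6, k7⟩ :=
      pvSweepRow_foldl rows cols kingdom start r hr (PySem.List.pyRange 0 cols 1) st hcs hg
    have hrow : pvSweepRow kingdom cols st r
        = (PySem.List.pyRange 0 cols 1).foldl (fun st c => pvSweepCell kingdom st r c) st := rfl
    obtain ⟨j1, j2, j3, j4, j5, j6, j7⟩ := ih (pvSweepRow kingdom cols st r)
      (fun r' hr' => hrs r' (List.mem_cons_of_mem _ hr')) (by rw [hrow]; exact k1)
    refine ⟨j1, fun x hx => j2 x (by rw [hrow]; exact k2 x hx), fun h => j3 (by rw [hrow]; exact k3 h),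
      fun hf => ?_, ?_, fun h0 ht => ?_, fun r' hr' c hc0 hc1 hX hp => ?_⟩
    · have h1 := j4 hf
      have h2 : (pvSweepRow kingdom cols st r).2 = false := by rw [h1] at hf; exact hf
      rw [h1]
      rw [hrow] at h2 ⊢
      exact k4 h2
    · calc st.1.length ≤ (pvSweepRow kingdom cols st r).1.length := by rw [hrow]; exact k5
        _ ≤ _ := j5
    · by_cases hmid : (pvSweepRow kingdom cols st r).2 = true
      · calc st.1.length < (pvSweepRow kingdom cols st r).1.length := by
              rw [hrow] at hmid ⊢; exact k6 h0 hmid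
          _ ≤ _ := j5
      · have hmid' : (pvSweepRow kingdom cols st r).2 = false := by simpa using hmid
        have hid : pvSweepRow kingdom cols st r = st := by rw [hrow] at hmid' ⊢; exact k4 hmid'
        rw [hid] at j6 ht ⊢
        exact j6 h0 ht
    · rcases List.mem_cons.mp hr' with rfl | hr''
      · refine j2 _ ?_
        rw [hrow]
        exact k7 c ((PySem.List.mem_pyRange_one).mpr ⟨hc0, hc1⟩) hX hp
      · refine j7 r' hr'' c hc0 hc1 hX ?_
        have hmono : ∀ y, y ∈ st.1 → y ∈ (pvSweepRow kingdom cols st r).1 := by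
          intro y hy; rw [hrow]; exact k2 y hy
        rcases hp with hp | hp | hp
        · exact Or.inl (hmono _ hp)
        · exact Or.inr (Or.inl (hmono _ hp))
        · exact Or.inr (Or.inr (hmono _ hp))

-- B's saturation loop computes exactly the reachable set
lemma pvSatB_spec (rows cols : Int) (kingdom : List (List String)) (start : Int × Int) :
    ∀ (k : Nat) (v : PySem.Set (Int × Int)),
    pvGood rows cols kingdom start v →
    rows.toNat * cols.toNat + 2 ≤ k + v.length →
    (∀ x ∈ v, x ∈ pvSatB rows cols kingdom k v) ∧
    (∀ x ∈ pvSatB rows cols kingdom k v, pvReach rows cols kingdom start x) ∧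
    (∀ x ∈ pvSatB rows cols kingdom k v, ∀ w, pvAdj rows cols kingdom x w →
        w ∈ pvSatB rows cols kingdom k v) ∧
    (pvSatB rows cols kingdom k v).Nodup := by
  intro k
  induction k with
  | zero =>
    intro v hg hfuel
    have := pv_len_le rows cols start v hg.1 hg.2.1
    omega
  | succ k IH =>
    intro v hg hfuel
    have hrs : ∀ r ∈ PySem.List.pyRange 0 rows 1, 0 ≤ r ∧ r < rows := by
      intro r hr; exact (PySem.List.mem_pyRange_one).mp hr
    obtain ⟨m1, m2, m3, m4, m5, m6, m7⟩ :=
      pvSweep_foldl rows cols kingdom start (PySem.List.pyRange 0 rows 1) (v, false) hrs hg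
    have hsw : pvSweep rows cols kingdom v
        = (PySem.List.pyRange 0 rows 1).foldl (pvSweepRow kingdom cols) (v, false) := rfl
    by_cases hch : (pvSweep rows cols kingdom v).2 = true
    · have heq : pvSatB rows cols kingdom (k + 1) v
          = pvSatB rows cols kingdom k (pvSweep rows cols kingdom v).1 := by
        simp only [pvSatB]
        rw [if_pos hch]
      have hgrow : v.length < (pvSweep rows cols kingdom v).1.length := by
        rw [hsw] at hch ⊢
        exact m6 rfl hch
      obtain ⟨g1, g2, g3, g4⟩ := IH (pvSweep rows cols kingdom v).1
        (by rw [hsw]; exact m1) (by omega)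
      rw [heq]
      exact ⟨fun x hx => g1 x (by rw [hsw]; exact m2 x hx), g2, g3, g4⟩
    · have hch' : (pvSweep rows cols kingdom v).2 = false := by simpa using hch
      have hfix : pvSweep rows cols kingdom v = (v, false) := by
        rw [hsw] at hch' ⊢
        exact m4 hch'
      have heq : pvSatB rows cols kingdom (k + 1) v = v := by
        simp only [pvSatB]
        rw [if_neg (by simp [hch']), hfix]
      rw [heq]
      refine ⟨fun x hx => hx, hg.2.2, fun x hx w hadj => ?_, hg.1⟩
      obtain ⟨⟨d, hd, hwe⟩, hok⟩ := hadj
      have hpred : (w.1 - 1, w.2) ∈ v ∨ (w.1, w.2 - 1) ∈ v ∨ (w.1 + 1, w.2) ∈ v := by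
        rcases w with ⟨w1, w2⟩
        rcases x with ⟨x1, x2⟩
        simp only [pvDirsB, List.mem_cons, List.not_mem_nil, or_false] at hd
        rcases hd with rfl | rfl | rfl <;>
          simp only [Prod.mk.injEq] at hwe <;>
          [exact Or.inl (by rw [show w1 - 1 = x1 by omega, show w2 = x2 by omega]; exact hx);
           exact Or.inr (Or.inl (by rw [show w1 = x1 by omega, show w2 - 1 = x2 by omega]; exact hx));
           exact Or.inr (Or.inr (by rw [show w1 + 1 = x1 by omega, show w2 = x2 by omega]; exact hx))]
      have hw : (w.1, w.2) ∈ ((PySem.List.pyRange 0 rows 1).foldl (pvSweepRow kingdom cols) (v, false)).1 :=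
        m7 w.1 ((PySem.List.mem_pyRange_one).mpr ⟨hok.1, hok.2.1⟩) w.2
          hok.2.2.1 hok.2.2.2.1 hok.2.2.2.2 hpred
      rw [← hsw, hfix] at hw
      simpa using hw

-- Python's tuple order on pairs of ints
def pvLexLe (a b : Int × Int) : Prop := a.1 < b.1 ∨ (a.1 = b.1 ∧ a.2 ≤ b.2)

def pvBefore (a b : Int × Int) : Bool :=
  decide (a.1 < b.1) || (!decide (b.1 < a.1) && decide (a.2 < b.2))

lemma pvBefore_true {a b : Int × Int} (h : pvBefore a b = true) : pvLexLe a b := by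
  simp [pvBefore] at h; simp [pvLexLe]; omega

lemma pvBefore_false {a b : Int × Int} (h : pvBefore a b = false) : pvLexLe b a := by
  simp [pvBefore] at h; simp [pvLexLe]; omega

lemma pvLexLe_trans {a b c : Int × Int} (h1 : pvLexLe a b) (h2 : pvLexLe b c) : pvLexLe a c := by
  simp [pvLexLe] at *; omega

lemma pv_insertBy_pairwise (x : Int × Int) :
    ∀ (l : List (Int × Int)), l.Pairwise pvLexLe →
    (PySem.List.insertBy pvBefore x l).Pairwise pvLexLe := by
  intro l
  induction l with
  | nil => intro _; simp [PySem.List.insertBy]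
  | cons y ys ih =>
    intro h
    rw [List.pairwise_cons] at h
    by_cases hb : pvBefore x y = true
    · simp only [PySem.List.insertBy, hb, if_true]
      refine List.Pairwise.cons ?_ (List.Pairwise.cons h.1 h.2)
      intro z hz
      rcases List.mem_cons.mp hz with rfl | hz'
      · exact pvBefore_true hb
      · exact pvLexLe_trans (pvBefore_true hb) (h.1 z hz')
    · have hb' : pvBefore x y = false := by simpa using hb
      simp only [PySem.List.insertBy, hb', Bool.false_eq_true, if_false]
      refine List.Pairwise.cons ?_ (ih h.2)
      intro z hz
      rcases (PySem.List.mem_insertBy pvBefore x z ys).mp hz with rfl | hz'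
      · exact pvBefore_false hb'
      · exact h.1 z hz'

lemma pv_foldl_insertBy_pairwise :
    ∀ (xs acc : List (Int × Int)), acc.Pairwise pvLexLe →
    (xs.foldl (fun acc x => PySem.List.insertBy pvBefore x acc) acc).Pairwise pvLexLe := by
  intro xs
  induction xs with
  | nil => intro acc h; simpa using h
  | cons x xs ih => intro acc h; exact ih _ (pv_insertBy_pairwise x acc h)

lemma pv_sorted2_pairwise (xs : List (Int × Int)) :
    (PySem.List.sorted2 xs Prod.fst Prod.snd false).Pairwise pvLexLe := by
  have h : PySem.List.sorted2 xs Prod.fst Prod.snd false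
      = xs.foldl (fun acc x => PySem.List.insertBy pvBefore x acc) [] := rfl
  rw [h]
  exact pv_foldl_insertBy_pairwise xs [] (by simp)

lemma pv_sorted2_congr (xs ys : List (Int × Int)) (h : xs.Perm ys) :
    PySem.List.sorted2 xs Prod.fst Prod.snd false
      = PySem.List.sorted2 ys Prod.fst Prod.snd false := by
  have hx := pv_sorted2_pairwise xs
  have hy := pv_sorted2_pairwise ys
  have hperm : (PySem.List.sorted2 xs Prod.fst Prod.snd false).Perm
      (PySem.List.sorted2 ys Prod.fst Prod.snd false) :=
    (PySem.List.sorted2_perm xs _ _ false).trans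
      (h.trans (PySem.List.sorted2_perm ys _ _ false).symm)
  refine List.Perm.eq_of_pairwise ?_ hx hy hperm
  intro a b _ _ h1 h2
  rcases a with ⟨a1, a2⟩; rcases b with ⟨b1, b2⟩
  simp only [pvLexLe] at h1 h2
  have : a1 = b1 ∧ a2 = b2 := by omega
  simp [this.1, this.2]


-- ===== VERDICT (by name: the statement is the Claim_ definition above) =====
theorem path_to_castle_spec : Claim_equal_path_to_castle := by
  intro town kingdom _hdom _hpre
  unfold Spec_path_to_castle
  by_cases hk : kingdom = []
  · simp [path_to_castle, path_to_castle_alt, hk]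
  · simp only [path_to_castle, path_to_castle_alt, if_neg hk]
    have hinitA : PySem.Set.add PySem.Set.empty (town.1, town.2) = [(town.1, town.2)] := by
      rw [PySem.Set.add_of_not_mem (by simp [PySem.Set.empty])]
      rfl
    have hinitB : PySem.Set.ofList [(town.1, town.2)] = [(town.1, town.2)] :=
      PySem.Set.ofList_eq_self_of_nodup _ (by simp)
    rw [hinitA, hinitB]
    set rows : Int := (kingdom.length : Int) with hrows
    set cols : Int := ((PySem.List.pyGetD kingdom 0 ([] : List String)).length : Int) with hcols
    set start : Int × Int := (town.1, town.2) with hstart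
    have hbase : ∀ x ∈ ([start] : List (Int × Int)), pvReach rows cols kingdom start x := by
      intro x hx
      rw [List.mem_singleton.mp hx]
      exact pvReach.base
    obtain ⟨a1, a2, a3, a4⟩ := pvDfsA_spec rows cols kingdom start
      (2 * (rows.toNat * cols.toNat) + 2) [start] [start]
      (by simp) (fun x hx => hx)
      (fun x hx => Or.inl (List.mem_singleton.mp hx))
      hbase
      (fun x hx hnx => absurd hx hnx)
      (by simp; omega)
    obtain ⟨b1, b2, b3, b4⟩ := pvSatB_spec rows cols kingdom start
      (rows.toNat * cols.toNat + 2) [start]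
      ⟨by simp, fun x hx => Or.inl (List.mem_singleton.mp hx), hbase⟩
      (by simp)
    have hAmem : ∀ x, x ∈ pvDfsA rows cols kingdom (2 * (rows.toNat * cols.toNat) + 2) [start] [start]
        ↔ pvReach rows cols kingdom start x := by
      intro x
      refine ⟨a2 x, fun h => ?_⟩
      induction h with
      | base => exact a1 start (List.mem_singleton_self _)
      | step hu hadj ih => exact a3 _ ih _ hadj
    have hBmem : ∀ x, x ∈ pvSatB rows cols kingdom (rows.toNat * cols.toNat + 2) [start]
        ↔ pvReach rows cols kingdom start x := by
      intro x
      refine ⟨b2 x, fun h => ?_⟩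
      induction h with
      | base => exact b1 start (List.mem_singleton_self _)
      | step hu hadj ih => exact b3 _ ih _ hadj
    exact pv_sorted2_congr _ _ ((List.perm_ext_iff_of_nodup a4 b4).mpr
      (fun a => (hAmem a).trans (hBmem a).symm))
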